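-- pv_equiv track=rewrite | github.com/StarkFactory/arc-reactor | scripts/ops/cleanup_mcp_duplicate_servers.py | pick_preferred_server
-- ===== SOURCE A (Python) =====
-- def pick_preferred_server(
--     servers_for_tool: list[str],
--     keep_servers: set[str],
-- ) -> str:
--     pinned = sorted([name for name in servers_for_tool if name in keep_servers])
--     if pinned:
--         return pinned[0]
--     return sorted(servers_for_tool)[0]
-- ===== SOURCE B (Python) =====
-- def pick_preferred_server(
--     servers_for_tool: list[str],
--     keep_servers: set[str],
-- ) -> str:
--     return min(servers_for_tool, key=lambda name: (name not in keep_servers, name))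
-- ===== Notes on version B (the rewrite author's own statement) =====
-- stated objective: simpler
-- what changed: Replaced the filter + two sorts + branch with a single linear-scan min over servers_for_tool using the composite key (name not in keep_servers, name), which ranks pinned names first and lexicographically within each group.
import Mathlib
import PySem

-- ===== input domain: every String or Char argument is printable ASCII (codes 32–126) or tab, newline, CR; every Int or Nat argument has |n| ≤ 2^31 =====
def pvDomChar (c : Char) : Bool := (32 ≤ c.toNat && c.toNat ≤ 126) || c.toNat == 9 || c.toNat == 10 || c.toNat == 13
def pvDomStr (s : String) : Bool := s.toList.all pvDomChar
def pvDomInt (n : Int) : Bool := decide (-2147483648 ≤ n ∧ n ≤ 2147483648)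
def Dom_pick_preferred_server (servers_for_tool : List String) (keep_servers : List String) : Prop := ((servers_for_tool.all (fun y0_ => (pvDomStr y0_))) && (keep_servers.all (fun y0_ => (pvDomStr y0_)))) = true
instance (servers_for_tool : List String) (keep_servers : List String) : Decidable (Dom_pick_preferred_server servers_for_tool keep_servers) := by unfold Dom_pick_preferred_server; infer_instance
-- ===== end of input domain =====

-- B replaces A's filter + two sorts + branch by one linear-scan min with the composite key
-- (name not in keep_servers, name) — simpler. Both Pythons raise on [], excluded by Pre_.

-- ===== PORT A =====
def pick_preferred_server (servers_for_tool : List String) (keep_servers : List String) : String :=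
  let pinned := PySem.List.sorted (servers_for_tool.filter (fun name => keep_servers.contains name)) (fun x => x) false
  if pinned ≠ [] then
    PySem.List.pyGetD pinned 0 ""
  else
    PySem.List.pyGetD (PySem.List.sorted servers_for_tool (fun x => x) false) 0 ""

-- ===== PORT B =====
def pick_preferred_server_alt (servers_for_tool : List String) (keep_servers : List String) : String :=
  (PySem.List.min2? servers_for_tool (fun name => !(keep_servers.contains name)) (fun name => name)).getD ""

-- ===== PRECONDITION & SPEC =====
-- Python A raises IndexError on an empty servers_for_tool (and B's min raises ValueError there).
def Pre_pick_preferred_server (servers_for_tool : List String) (keep_servers : List String) : Prop :=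
  servers_for_tool ≠ []
instance (servers_for_tool : List String) (keep_servers : List String) : Decidable (Pre_pick_preferred_server servers_for_tool keep_servers) := by unfold Pre_pick_preferred_server; infer_instance
def pvWitness_pick_preferred_server : List String × List String := (["beta", "alpha"], ["beta"])

def Spec_pick_preferred_server (servers_for_tool : List String) (keep_servers : List String) (out : String) : Prop := out = pick_preferred_server_alt servers_for_tool keep_servers
instance (servers_for_tool : List String) (keep_servers : List String) (out : String) : Decidable (Spec_pick_preferred_server servers_for_tool keep_servers out) := by unfold Spec_pick_preferred_server; infer_instance

-- ===== CLAIM (what is proved, stated in full; the proofs are below) =====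
def Claim_equal_pick_preferred_server : Prop := ∀ (servers_for_tool : List String) (keep_servers : List String), Dom_pick_preferred_server servers_for_tool keep_servers → Pre_pick_preferred_server servers_for_tool keep_servers → Spec_pick_preferred_server servers_for_tool keep_servers (pick_preferred_server servers_for_tool keep_servers)

-- ===== LEMMAS AND PROOFS =====

-- lexicographic order on the composite key (k1 name, name)
def pvLexLe (k1 : String → Bool) (a b : String) : Prop :=
  k1 a < k1 b ∨ (k1 a = k1 b ∧ a ≤ b)

theorem pvLexLe_refl (k1 : String → Bool) (a : String) : pvLexLe k1 a a :=
  Or.inr ⟨rfl, le_refl a⟩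

theorem pvLexLe_trans (k1 : String → Bool) {a b c : String}
    (h1 : pvLexLe k1 a b) (h2 : pvLexLe k1 b c) : pvLexLe k1 a c := by
  rcases h1 with h1 | ⟨e1, l1⟩ <;> rcases h2 with h2 | ⟨e2, l2⟩
  · exact Or.inl (lt_trans h1 h2)
  · exact Or.inl (e2 ▸ h1)
  · exact Or.inl (e1 ▸ h2)
  · exact Or.inr ⟨e1.trans e2, le_trans l1 l2⟩

-- the fold step of min2? with identity second key
def pvStep (k1 : String → Bool) (acc : Option String) (x : String) : Option String :=
  match acc with
  | none => some x
  | some m => if (decide (k1 x < k1 m) || !decide (k1 m < k1 x) && decide (x < m)) = true then some x else some m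

theorem pvStep_true {k1 : String → Bool} {m x : String}
    (h : (decide (k1 x < k1 m) || !decide (k1 m < k1 x) && decide (x < m)) = true) :
    pvLexLe k1 x m := by
  simp only [Bool.or_eq_true, Bool.and_eq_true, decide_eq_true_iff, Bool.not_eq_true',
    decide_eq_false_iff_not] at h
  rcases h with h | ⟨hng, hlt⟩
  · exact Or.inl h
  · rcases lt_trichotomy (k1 x) (k1 m) with h | h | h
    · exact Or.inl h
    · exact Or.inr ⟨h, le_of_lt hlt⟩
    · exact absurd h hng

theorem pvStep_false {k1 : String → Bool} {m x : String}
    (h : ¬ (decide (k1 x < k1 m) || !decide (k1 m < k1 x) && decide (x < m)) = true) :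
    pvLexLe k1 m x := by
  simp only [Bool.or_eq_true, Bool.and_eq_true, decide_eq_true_iff, Bool.not_eq_true',
    decide_eq_false_iff_not, not_or, not_and_or, not_not] at h
  obtain ⟨h1, h2⟩ := h
  rcases h2 with h2 | h2
  · exact Or.inl h2
  · rcases lt_trichotomy (k1 m) (k1 x) with hh | hh | hh
    · exact Or.inl hh
    · exact Or.inr ⟨hh, not_lt.mp h2⟩
    · exact absurd hh h1

theorem pvMin2_go (k1 : String → Bool) (xs : List String) (m : String) :
    ∃ r, xs.foldl (pvStep k1) (some m) = some r ∧ r ∈ m :: xs ∧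
      ∀ y ∈ m :: xs, pvLexLe k1 r y := by
  induction xs generalizing m with
  | nil =>
    exact ⟨m, rfl, List.mem_cons_self .., by
      intro y hy
      rcases List.mem_cons.mp hy with rfl | hy
      · exact pvLexLe_refl k1 y
      · exact absurd hy (List.not_mem_nil)⟩
  | cons x xs ih =>
    rw [List.foldl_cons]
    by_cases hc : (decide (k1 x < k1 m) || !decide (k1 m < k1 x) && decide (x < m)) = true
    · have hstep : pvStep k1 (some m) x = some x := by
        have : pvStep k1 (some m) x = if (decide (k1 x < k1 m) || !decide (k1 m < k1 x) && decide (x < m)) = true then some x else some m := rfl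
        rw [this, if_pos hc]
      obtain ⟨r, hr, hmem, hmin⟩ := ih x
      refine ⟨r, by rw [hstep]; exact hr, ?_, ?_⟩
      · rcases List.mem_cons.mp hmem with rfl | hmem
        · exact List.mem_cons_of_mem _ (List.mem_cons_self ..)
        · exact List.mem_cons_of_mem _ (List.mem_cons_of_mem _ hmem)
      · intro y hy
        rcases List.mem_cons.mp hy with rfl | hy
        · exact pvLexLe_trans k1 (hmin x (List.mem_cons_self ..)) (pvStep_true hc)
        · exact hmin y hy
    · have hstep : pvStep k1 (some m) x = some m := by
        have : pvStep k1 (some m) x = if (decide (k1 x < k1 m) || !decide (k1 m < k1 x) && decide (x < m)) = true then some x else some m := rfl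
        rw [this, if_neg hc]
      obtain ⟨r, hr, hmem, hmin⟩ := ih m
      refine ⟨r, by rw [hstep]; exact hr, ?_, ?_⟩
      · rcases List.mem_cons.mp hmem with rfl | hmem
        · exact List.mem_cons_self ..
        · exact List.mem_cons_of_mem _ (List.mem_cons_of_mem _ hmem)
      · intro y hy
        rcases List.mem_cons.mp hy with rfl | hy
        · exact hmin y (List.mem_cons_self ..)
        · rcases List.mem_cons.mp hy with rfl | hy
          · exact pvLexLe_trans k1 (hmin m (List.mem_cons_self ..)) (pvStep_false hc)
          · exact hmin y (List.mem_cons_of_mem _ hy)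

theorem pvMin2_eq (k1 : String → Bool) (xs : List String) :
    PySem.List.min2? xs k1 (fun n => n) = xs.foldl (pvStep k1) none := by
  unfold PySem.List.min2?
  congr 1
  funext acc x
  cases acc <;> rfl

theorem pvMin2_spec (k1 : String → Bool) (x : String) (xs : List String) :
    ∃ r, PySem.List.min2? (x :: xs) k1 (fun n => n) = some r ∧ r ∈ x :: xs ∧
      ∀ y ∈ x :: xs, pvLexLe k1 r y := by
  obtain ⟨r, hr, hmem, hmin⟩ := pvMin2_go k1 xs x
  exact ⟨r, by rw [pvMin2_eq, List.foldl_cons]; exact hr, hmem, hmin⟩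

-- head of sorted(ys) is a member and a lower bound
theorem pvSortedHead_spec (ys : List String) (h : ys ≠ []) :
    PySem.List.pyGetD (PySem.List.sorted ys (fun x => x) false) 0 "" ∈ ys ∧
      ∀ y ∈ ys, PySem.List.pyGetD (PySem.List.sorted ys (fun x => x) false) 0 "" ≤ y := by
  have hne : PySem.List.sorted ys (fun x => x) false ≠ [] := by
    rw [Ne, PySem.List.sorted_eq_nil_iff]; exact h
  obtain ⟨a, t, he⟩ := List.exists_cons_of_ne_nil hne
  rw [he, PySem.List.pyGetD_zero_cons]
  constructor
  · exact (PySem.List.mem_sorted _ _ _ _).mp (he ▸ List.mem_cons_self ..)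
  · exact PySem.List.key_head_sorted_le _ _ he

theorem pick_preferred_server_spec : Claim_equal_pick_preferred_server := by
  unfold Claim_equal_pick_preferred_server
  intro xs ks _ hpre
  unfold Spec_pick_preferred_server Pre_pick_preferred_server at *
  obtain ⟨x, xs', rfl⟩ := List.exists_cons_of_ne_nil hpre
  set k1 : String → Bool := fun name => !(ks.contains name) with hk1
  obtain ⟨r, hr, hmem, hmin⟩ := pvMin2_spec k1 x xs'
  unfold pick_preferred_server pick_preferred_server_alt
  rw [hr, Option.getD_some]
  by_cases hp : (x :: xs').filter (fun name => ks.contains name) ≠ []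
  · -- kept case
    obtain ⟨ha_mem, ha_min⟩ := pvSortedHead_spec _ hp
    rw [if_pos (by rw [Ne, PySem.List.sorted_eq_nil_iff]; exact hp)]
    set a := PySem.List.pyGetD (PySem.List.sorted ((x :: xs').filter (fun name => ks.contains name)) (fun x => x) false) 0 ""
    have ⟨ha_in, ha_keep⟩ := List.mem_filter.mp ha_mem
    have hk1a : k1 a = false := by rw [hk1]; simp only [ha_keep, Bool.not_true]
    have hle : pvLexLe k1 r a := hmin a ha_in
    have hk1r : k1 r = false := by
      rcases hle with h | ⟨h, _⟩
      · rw [hk1a] at h; exact absurd h (by simp)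
      · rw [h, hk1a]
    have hrkeep : ks.contains r = true := by
      by_contra hcon
      simp [hk1] at hk1r hcon
      exact hcon hk1r
    have hrfilter : r ∈ (x :: xs').filter (fun name => ks.contains name) :=
      List.mem_filter.mpr ⟨hmem, hrkeep⟩
    have h1 : a ≤ r := ha_min r hrfilter
    have h2 : r ≤ a := by
      rcases hle with h | ⟨_, h⟩
      · rw [hk1a] at h; exact absurd h (by simp)
      · exact h
    exact le_antisymm h1 h2
  · -- no kept servers
    rw [not_ne_iff] at hp
    rw [if_neg (by rw [not_ne_iff, PySem.List.sorted_eq_nil_iff]; exact hp)]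
    have hall : ∀ y ∈ x :: xs', ks.contains y = false := by
      intro y hy
      by_contra hcon
      have : y ∈ (x :: xs').filter (fun name => ks.contains name) :=
        List.mem_filter.mpr ⟨hy, by simpa using hcon⟩
      rw [hp] at this
      exact absurd this (List.not_mem_nil)
    obtain ⟨ha_mem, ha_min⟩ := pvSortedHead_spec (x :: xs') (List.cons_ne_nil x xs')
    set a := PySem.List.pyGetD (PySem.List.sorted (x :: xs') (fun x => x) false) 0 ""
    have hle : pvLexLe k1 r a := hmin a ha_mem
    have h2 : r ≤ a := by
      rcases hle with h | ⟨_, h⟩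
      · have hka : k1 a = true := by rw [hk1]; simp only [hall a ha_mem, Bool.not_false]
        have hkr : k1 r = true := by rw [hk1]; simp only [hall r hmem, Bool.not_false]
        rw [hkr, hka] at h
        exact absurd h (by simp)
      · exact h
    have h1 : a ≤ r := ha_min r hmem
    exact le_antisymm h1 h2
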